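-- pv_equiv track=rewrite | github.com/diegovargasj/RLA | RLA/SuperMajority/views.py | _count_to_grouped_count
-- ===== SOURCE A (Python) =====
-- def _count_to_grouped_count(vote_count, winner):
--     grouped_count = {'Winner': 0, 'Losers': 0}
--     for c in vote_count:
--         if c == winner:
--             grouped_count['Winner'] += vote_count[c]
--
--         else:
--             grouped_count['Losers'] += vote_count[c]
--
--     return grouped_count
-- ===== SOURCE B (Python) =====
-- def _count_to_grouped_count(vote_count, winner):
--     total = sum(vote_count.values())
--     winner_votes = vote_count.get(winner, 0)
--     return {'Winner': winner_votes, 'Losers': total - winner_votes}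
-- ===== Notes on version B (the rewrite author's own statement) =====
-- stated objective: simpler
-- what changed: Replaces the per-key if/else accumulation loop with two aggregations: one total sum of all values and a single .get lookup of the winner, deriving Losers as total - winner_votes.
import Mathlib
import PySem

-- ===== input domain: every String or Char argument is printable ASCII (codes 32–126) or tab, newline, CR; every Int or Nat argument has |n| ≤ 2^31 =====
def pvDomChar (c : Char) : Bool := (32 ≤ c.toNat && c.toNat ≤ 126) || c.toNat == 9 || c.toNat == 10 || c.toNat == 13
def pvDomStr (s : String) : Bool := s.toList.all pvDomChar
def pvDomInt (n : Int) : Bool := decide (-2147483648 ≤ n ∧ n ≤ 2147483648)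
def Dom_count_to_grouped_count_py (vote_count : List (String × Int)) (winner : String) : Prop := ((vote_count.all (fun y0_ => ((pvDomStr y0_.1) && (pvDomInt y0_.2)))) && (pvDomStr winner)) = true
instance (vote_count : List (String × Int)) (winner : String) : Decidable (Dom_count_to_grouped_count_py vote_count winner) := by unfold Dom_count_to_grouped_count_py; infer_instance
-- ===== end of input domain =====

-- B replaces A's per-key if/else accumulation with one total sum, one winner lookup and a subtraction (objective: simpler).

-- ===== PORT A =====
-- dict first-match lookup vote_count[c]; inside A's loop c is always a present key, so the lookup never raises
def pvLookupA (vc : List (String × Int)) (k : String) : Int :=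
  ((vc.find? (fun p => p.1 == k)).map (fun p => p.2)).getD 0

def count_to_grouped_count_py (vote_count : List (String × Int)) (winner : String) : List (String × Int) :=
  -- grouped_count = {'Winner': 0, 'Losers': 0}; for c in vote_count: if c == winner: Winner += vote_count[c] else Losers += vote_count[c]
  let g := vote_count.foldl
    (fun (g : Int × Int) c =>
      if c.1 == winner then (g.1 + pvLookupA vote_count c.1, g.2)
      else (g.1, g.2 + pvLookupA vote_count c.1))
    ((0 : Int), (0 : Int))
  [("Winner", g.1), ("Losers", g.2)]

-- ===== PORT B =====
def count_to_grouped_count_py_alt (vote_count : List (String × Int)) (winner : String) : List (String × Int) :=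
  let total := (vote_count.map (fun p => p.2)).sum
  let winner_votes := ((vote_count.find? (fun p => p.1 == winner)).map (fun p => p.2)).getD 0
  [("Winner", winner_votes), ("Losers", total - winner_votes)]

-- ===== PRECONDITION & SPEC =====
-- Pre_ excludes association lists with duplicate keys: a Python dict cannot have them, so no dict input corresponds to such a list.
def Pre_count_to_grouped_count_py (vote_count : List (String × Int)) (winner : String) : Prop :=
  (vote_count.map (fun p => p.1)).Nodup
instance (vote_count : List (String × Int)) (winner : String) : Decidable (Pre_count_to_grouped_count_py vote_count winner) := by unfold Pre_count_to_grouped_count_py; infer_instance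

def pvWitness_count_to_grouped_count_py : (List (String × Int)) × String := ([("a", 3), ("b", 2)], "a")

def Spec_count_to_grouped_count_py (vote_count : List (String × Int)) (winner : String) (out : List (String × Int)) : Prop := out = count_to_grouped_count_py_alt vote_count winner
instance (vote_count : List (String × Int)) (winner : String) (out : List (String × Int)) : Decidable (Spec_count_to_grouped_count_py vote_count winner out) := by unfold Spec_count_to_grouped_count_py; infer_instance

-- ===== CLAIM (what is proved, stated in full; the proofs are below) =====
def Claim_equal_count_to_grouped_count_py : Prop := ∀ (vote_count : List (String × Int)) (winner : String), Dom_count_to_grouped_count_py vote_count winner → Pre_count_to_grouped_count_py vote_count winner → Spec_count_to_grouped_count_py vote_count winner (count_to_grouped_count_py vote_count winner)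

-- ===== LEMMAS AND PROOFS =====

-- with unique keys, the first-match lookup of a member's key returns that member's value
theorem pvLookupA_of_mem (vc : List (String × Int)) (c : String × Int) :
    (vc.map (fun p => p.1)).Nodup → c ∈ vc → pvLookupA vc c.1 = c.2 := by
  induction vc with
  | nil => intro _ hc; cases hc
  | cons h t ih =>
    intro hnd hc
    simp only [List.map_cons, List.nodup_cons, List.mem_map] at hnd
    rcases List.mem_cons.mp hc with hc | hc
    · subst hc; simp [pvLookupA, List.find?]
    · by_cases hk : h.1 = c.1
      · exact absurd ⟨c, hc, hk.symm⟩ hnd.1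
      · simpa [pvLookupA, List.find?_cons, beq_iff_eq, hk] using ih hnd.2 hc

-- the loop with per-element values: adds winner-filtered sum to the first slot, the rest to the second
theorem pvFold_eval (winner : String) (l : List (String × Int)) (a b : Int)
    (look : String → Int) (hl : ∀ c ∈ l, look c.1 = c.2) :
    l.foldl (fun (g : Int × Int) c =>
        if c.1 == winner then (g.1 + look c.1, g.2) else (g.1, g.2 + look c.1)) (a, b)
      = (a + ((l.filter (fun p => p.1 == winner)).map (fun p => p.2)).sum,
         b + ((l.filter (fun p => !(p.1 == winner))).map (fun p => p.2)).sum) := by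
  induction l generalizing a b with
  | nil => simp
  | cons c t ih =>
    have hc := hl c (List.mem_cons_self ..)
    have ht : ∀ d ∈ t, look d.1 = d.2 := fun d hd => hl d (List.mem_cons_of_mem _ hd)
    by_cases hw : c.1 = winner
    · rw [List.foldl_cons, if_pos (by simpa using hw), ih _ _ ht, hc]
      simp only [List.filter_cons]
      rw [if_pos (by simpa using hw), if_neg (by simpa using hw)]
      simp only [List.map_cons, List.sum_cons, Prod.mk.injEq]
      exact ⟨by ring, trivial⟩
    · rw [List.foldl_cons, if_neg (by simpa using hw), ih _ _ ht, hc]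
      simp only [List.filter_cons]
      rw [if_neg (by simpa using hw), if_pos (by simpa using hw)]
      simp only [List.map_cons, List.sum_cons, Prod.mk.injEq]
      exact ⟨trivial, by ring⟩

-- under unique keys the winner-filtered sum is exactly B's find?-lookup
theorem pvWfilter_eq_find (winner : String) (vc : List (String × Int))
    (hnd : (vc.map (fun p => p.1)).Nodup) :
    ((vc.filter (fun p => p.1 == winner)).map (fun p => p.2)).sum
      = ((vc.find? (fun p => p.1 == winner)).map (fun p => p.2)).getD 0 := by
  induction vc with
  | nil => simp
  | cons h t ih =>
    simp only [List.map_cons, List.nodup_cons, List.mem_map] at hnd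
    by_cases hw : h.1 = winner
    · have htz : t.filter (fun p => p.1 == winner) = [] := by
        apply List.filter_eq_nil_iff.mpr
        intro p hp
        simp only [beq_iff_eq]
        intro hpw
        exact hnd.1 ⟨p, hp, by rw [hpw, hw]⟩
      simp [List.filter_cons, List.find?_cons, hw, htz]
    · simpa [List.filter_cons, List.find?_cons, hw] using ih hnd.2

-- total = winner part + losers part
theorem pvSum_split (winner : String) (vc : List (String × Int)) :
    (vc.map (fun p => p.2)).sum
      = ((vc.filter (fun p => p.1 == winner)).map (fun p => p.2)).sum
        + ((vc.filter (fun p => !(p.1 == winner))).map (fun p => p.2)).sum := by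
  induction vc with
  | nil => simp
  | cons h t ih =>
    by_cases hw : h.1 = winner <;> simp [List.filter_cons, hw, ih] <;> ring

-- ===== VERDICT (by name: the statement is the Claim_ definition above) =====
theorem count_to_grouped_count_py_spec : Claim_equal_count_to_grouped_count_py := by
  intro vc winner _ hpre
  unfold Spec_count_to_grouped_count_py count_to_grouped_count_py count_to_grouped_count_py_alt
  have hl : ∀ c ∈ vc, pvLookupA vc c.1 = c.2 := fun c hc => pvLookupA_of_mem vc c hpre hc
  rw [pvFold_eval winner vc 0 0 (pvLookupA vc) hl]
  simp only [zero_add]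
  rw [pvWfilter_eq_find winner vc hpre, pvSum_split winner vc,
      pvWfilter_eq_find winner vc hpre]
  simp only [List.cons.injEq, Prod.mk.injEq, and_true, true_and]
  ring
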